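-- pv_equiv track=rewrite | github.com/austinsatterfieldmd/PEM-CE-Outcomes | scripts/fix_batch3_comorbidity.py | aggregate_field
-- ===== SOURCE A (Python) =====
-- from collections import Counter
--
-- def aggregate_field(gpt_val, claude_val, gemini_val):
--     """Simple 3-model majority vote for a single field."""
--     # Normalize
--     def norm(v):
--         if v is None:
--             return None
--         s = str(v).strip()
--         return s if s else None
--
--     vals = [norm(gpt_val), norm(claude_val), norm(gemini_val)]
--     non_none = [v for v in vals if v is not None]
--
--     if not non_none:
--         return None  # All None → None
--
--     counts = Counter(vals)
--     most_common = counts.most_common()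
--
--     # Unanimous or majority
--     if most_common[0][1] >= 2:
--         return most_common[0][0]
--
--     # 3-way conflict — return None (needs manual review)
--     return None
-- ===== SOURCE B (Python) =====
-- def aggregate_field(gpt_val, claude_val, gemini_val):
--     """Simple 3-model majority vote for a single field."""
--     def norm(v):
--         if v is None:
--             return None
--         s = str(v).strip()
--         return s if s else None
--
--     a = norm(gpt_val)
--     b = norm(claude_val)
--     c = norm(gemini_val)
--     if a is not None and a == b:
--         return a
--     if a is not None and a == c:
--         return a
--     if b is not None and b == c:
--         return b
--     return None
-- ===== Notes on version B (the rewrite author's own statement) =====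
-- stated objective: simpler
-- what changed: Replaced the Counter/most_common tally over the normalized list with three guarded pairwise equality checks (None-guarded so two empty/None votes never form a majority), removing the list building, filtering and sorting entirely.
import Mathlib
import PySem

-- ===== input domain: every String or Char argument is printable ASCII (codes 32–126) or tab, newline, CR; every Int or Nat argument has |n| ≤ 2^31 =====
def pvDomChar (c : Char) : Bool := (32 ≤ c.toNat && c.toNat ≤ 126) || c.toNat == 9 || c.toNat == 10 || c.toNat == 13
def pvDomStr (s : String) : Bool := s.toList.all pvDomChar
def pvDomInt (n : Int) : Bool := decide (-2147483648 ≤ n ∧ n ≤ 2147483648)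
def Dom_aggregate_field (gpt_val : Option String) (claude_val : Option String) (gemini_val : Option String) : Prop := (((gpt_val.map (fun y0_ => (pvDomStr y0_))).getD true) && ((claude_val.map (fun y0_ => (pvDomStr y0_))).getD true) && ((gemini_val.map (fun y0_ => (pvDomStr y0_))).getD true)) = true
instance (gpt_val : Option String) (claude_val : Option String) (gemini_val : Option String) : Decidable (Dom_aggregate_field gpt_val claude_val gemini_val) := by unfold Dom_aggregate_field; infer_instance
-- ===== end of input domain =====

-- B replaces A's Counter/most_common tally by three None-guarded pairwise equality checks (objective: simpler).

-- ===== PORT A =====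
-- A's inner helper `norm`: None stays None, otherwise strip; an empty result becomes None
def pvNorm (v : Option String) : Option String :=
  match v with
  | none => none
  | some s0 =>
    let s := PySem.Str.strip s0
    if s = "" then none else some s

def aggregate_field (gpt_val : Option String) (claude_val : Option String) (gemini_val : Option String) : Option String :=
  let vals : List (Option String) := [pvNorm gpt_val, pvNorm claude_val, pvNorm gemini_val]
  let non_none := vals.filter (fun v => v ≠ none)
  if non_none = [] then none
  else
    let counts := PySem.Dict.counter vals
    -- counts.most_common() = items sorted by count, descending, stable
    let most_common := PySem.List.sorted counts.items (fun p => p.2) true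
    match most_common with
    | [] => none   -- unreachable: vals is nonempty, so most_common[0] exists
    | (k, cnt) :: _ => if cnt ≥ 2 then k else none

-- ===== PORT B =====
def aggregate_field_alt (gpt_val : Option String) (claude_val : Option String) (gemini_val : Option String) : Option String :=
  let a := pvNorm gpt_val
  let b := pvNorm claude_val
  let c := pvNorm gemini_val
  if a ≠ none ∧ a = b then a
  else if a ≠ none ∧ a = c then a
  else if b ≠ none ∧ b = c then b
  else none

-- ===== PRECONDITION & SPEC =====
def Spec_aggregate_field (gpt_val : Option String) (claude_val : Option String) (gemini_val : Option String) (out : Option String) : Prop := out = aggregate_field_alt gpt_val claude_val gemini_val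
instance (gpt_val : Option String) (claude_val : Option String) (gemini_val : Option String) (out : Option String) : Decidable (Spec_aggregate_field gpt_val claude_val gemini_val out) := by unfold Spec_aggregate_field; infer_instance

-- ===== CLAIM (what is proved, stated in full; the proofs are below) =====
def Claim_equal_aggregate_field : Prop := ∀ (gpt_val : Option String) (claude_val : Option String) (gemini_val : Option String), Dom_aggregate_field gpt_val claude_val gemini_val → Spec_aggregate_field gpt_val claude_val gemini_val (aggregate_field gpt_val claude_val gemini_val)

-- ===== LEMMAS AND PROOFS =====

-- Proof-side abbreviation for A's body as a function of the three NORMALIZED values.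
def pvBodyA (a b c : Option String) : Option String :=
  let vals : List (Option String) := [a, b, c]
  let non_none := vals.filter (fun v => v ≠ none)
  if non_none = [] then none
  else
    let counts := PySem.Dict.counter vals
    let most_common := PySem.List.sorted counts.items (fun p => p.2) true
    match most_common with
    | [] => none
    | (k, cnt) :: _ => if cnt ≥ 2 then k else none

-- The four majority patterns of three votes, evaluated through Counter + stable descending sort.
lemma pvBodyA_ab (a b c : Option String) (hab : a = b) : pvBodyA a b c = a := by
  subst hab
  rcases eq_or_ne a c with hac | hac
  · subst hac
    rcases eq_or_ne a none with ha | ha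
    · subst ha
      simp [pvBodyA]
    · simp [pvBodyA, PySem.Dict.items_counter, PySem.Set.ofList, PySem.Set.add, PySem.Set.contains,
            PySem.List.sorted, PySem.List.insertBy, ha, List.count_cons]
  · have hca : ¬ (c = a) := fun h => hac h.symm
    rcases eq_or_ne a none with ha | ha
    · subst ha
      simp [pvBodyA, PySem.Dict.items_counter, PySem.Set.ofList, PySem.Set.add, PySem.Set.contains,
            PySem.List.sorted, PySem.List.insertBy, hac, hca, List.count_cons]
    · simp [pvBodyA, PySem.Dict.items_counter, PySem.Set.ofList, PySem.Set.add, PySem.Set.contains,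
            PySem.List.sorted, PySem.List.insertBy, ha, hac, hca, List.count_cons]

lemma pvBodyA_ac (a b c : Option String) (hab : a ≠ b) (hac : a = c) : pvBodyA a b c = a := by
  subst hac
  have hba : ¬ (b = a) := fun h => hab h.symm
  rcases eq_or_ne a none with ha | ha
  · subst ha
    simp [pvBodyA, PySem.Dict.items_counter, PySem.Set.ofList, PySem.Set.add, PySem.Set.contains,
          PySem.List.sorted, PySem.List.insertBy, hab, hba, List.count_cons]
  · simp [pvBodyA, PySem.Dict.items_counter, PySem.Set.ofList, PySem.Set.add, PySem.Set.contains,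
          PySem.List.sorted, PySem.List.insertBy, hab, hba, ha, List.count_cons]

lemma pvBodyA_bc (a b c : Option String) (hab : a ≠ b) (hbc : b = c) : pvBodyA a b c = b := by
  subst hbc
  have hba : ¬ (b = a) := fun h => hab h.symm
  rcases eq_or_ne b none with hb | hb
  · subst hb
    simp [pvBodyA, PySem.Dict.items_counter, PySem.Set.ofList, PySem.Set.add, PySem.Set.contains,
          PySem.List.sorted, PySem.List.insertBy, hab, hba, List.count_cons]
  · simp [pvBodyA, PySem.Dict.items_counter, PySem.Set.ofList, PySem.Set.add, PySem.Set.contains,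
          PySem.List.sorted, PySem.List.insertBy, hab, hba, hb, List.count_cons]

lemma pvBodyA_distinct (a b c : Option String) (hab : a ≠ b) (hac : a ≠ c) (hbc : b ≠ c) :
    pvBodyA a b c = none := by
  have hba : ¬ (b = a) := fun h => hab h.symm
  have hca : ¬ (c = a) := fun h => hac h.symm
  have hcb : ¬ (c = b) := fun h => hbc h.symm
  simp [pvBodyA, PySem.Dict.items_counter, PySem.Set.ofList, PySem.Set.add, PySem.Set.contains,
        PySem.List.sorted, PySem.List.insertBy, hab, hba, hac, hca, hbc, hcb, List.count_cons]

lemma core_eq (a b c : Option String) :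
    pvBodyA a b c
    = (if a ≠ none ∧ a = b then a
       else if a ≠ none ∧ a = c then a
       else if b ≠ none ∧ b = c then b
       else none) := by
  by_cases hab : a = b
  · rw [pvBodyA_ab a b c hab]
    subst hab
    by_cases ha : a = none
    · simp [ha]
    · simp [ha]
  · by_cases hac : a = c
    · rw [pvBodyA_ac a b c hab hac]
      subst hac
      by_cases ha : a = none
      · simp [ha]
      · simp [ha]
    · by_cases hbc : b = c
      · rw [pvBodyA_bc a b c hab hbc]
        by_cases hb : b = none
        · subst hbc; simp [hb]
        · simp [hac, hbc]
      · rw [pvBodyA_distinct a b c hab hac hbc]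
        simp [hab, hac, hbc]

-- ===== VERDICT (by name: the statement is the Claim_ definition above) =====
theorem aggregate_field_spec : Claim_equal_aggregate_field := by
  intro g c m _
  unfold Spec_aggregate_field aggregate_field aggregate_field_alt
  exact core_eq (pvNorm g) (pvNorm c) (pvNorm m)
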